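-- pv_equiv track=rewrite | github.com/LeanVibe/bee-hive | scratchpad/dashboard_coordination_validation.py | _simulate_agent_routing
-- ===== SOURCE A (Python) =====
-- from typing import Dict, Any, List, Optional, Tuple
--
-- def _simulate_agent_routing(keywords: List[str]) -> str:
--     """Simulate agent routing based on keywords."""
--     # Simple keyword-based routing simulation
--     if any(word in keywords for word in ["security", "jwt", "auth"]):
--         return "security-specialist"
--     elif any(word in keywords for word in ["ui", "frontend", "component"]):
--         return "frontend-developer"
--     elif any(word in keywords for word in ["api", "backend", "integration"]):
--         return "api-integration"
--     elif any(word in keywords for word in ["performance", "monitoring"]):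
--         return "performance-engineer"
--     elif any(word in keywords for word in ["architecture", "design"]):
--         return "dashboard-architect"
--     else:
--         return "qa-validator"
-- ===== SOURCE B (Python) =====
-- _PRIORITY = {
--     "security": 0, "jwt": 0, "auth": 0,
--     "ui": 1, "frontend": 1, "component": 1,
--     "api": 2, "backend": 2, "integration": 2,
--     "performance": 3, "monitoring": 3,
--     "architecture": 4, "design": 4,
-- }
--
-- _AGENTS = [
--     "security-specialist", "frontend-developer", "api-integration",
--     "performance-engineer", "dashboard-architect", "qa-validator",
-- ]
--
-- def _simulate_agent_routing(keywords):
--     """Single pass over the input: keep the best (lowest) routing priority seen."""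
--     best = 5
--     for kw in keywords:
--         p = _PRIORITY.get(kw, 5)
--         if p < best:
--             best = p
--     return _AGENTS[best]
-- ===== Notes on version B (the rewrite author's own statement) =====
-- stated objective: faster
-- what changed: Instead of six sequential any-scans over the routing keyword lists, B makes one pass over the input keywords, mapping each to a numeric priority via a dict and keeping the minimum, then indexes an agent table; first-match priority becomes min-priority.
import Mathlib
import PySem

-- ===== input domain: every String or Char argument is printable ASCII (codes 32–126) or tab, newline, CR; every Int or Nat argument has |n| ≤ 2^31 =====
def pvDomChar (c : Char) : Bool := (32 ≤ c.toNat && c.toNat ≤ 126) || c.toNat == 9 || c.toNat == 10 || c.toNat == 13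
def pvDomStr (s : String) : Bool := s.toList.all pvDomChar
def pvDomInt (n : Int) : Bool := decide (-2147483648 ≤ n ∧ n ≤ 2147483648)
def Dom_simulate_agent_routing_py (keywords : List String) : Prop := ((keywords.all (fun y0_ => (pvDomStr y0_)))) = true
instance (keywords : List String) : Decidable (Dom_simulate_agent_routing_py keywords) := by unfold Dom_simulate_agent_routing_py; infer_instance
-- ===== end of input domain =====

-- B replaces A's six sequential any-scans over the route keyword lists by one pass over the
-- input keywords keeping the minimum routing priority (alternative algorithm, same results).

-- ===== PORT A =====
def simulate_agent_routing_py (keywords : List String) : String :=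
  if (["security", "jwt", "auth"] : List String).any (fun word => keywords.contains word) then
    "security-specialist"
  else if (["ui", "frontend", "component"] : List String).any (fun word => keywords.contains word) then
    "frontend-developer"
  else if (["api", "backend", "integration"] : List String).any (fun word => keywords.contains word) then
    "api-integration"
  else if (["performance", "monitoring"] : List String).any (fun word => keywords.contains word) then
    "performance-engineer"
  else if (["architecture", "design"] : List String).any (fun word => keywords.contains word) then
    "dashboard-architect"
  else
    "qa-validator"

-- ===== PORT B =====
def pvPriority : PySem.Dict String Int :=
  PySem.Dict.ofList
    [("security", 0), ("jwt", 0), ("auth", 0),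
     ("ui", 1), ("frontend", 1), ("component", 1),
     ("api", 2), ("backend", 2), ("integration", 2),
     ("performance", 3), ("monitoring", 3),
     ("architecture", 4), ("design", 4)]

def pvAgents : List String :=
  ["security-specialist", "frontend-developer", "api-integration",
   "performance-engineer", "dashboard-architect", "qa-validator"]

def simulate_agent_routing_py_alt (keywords : List String) : String :=
  let best : Int := keywords.foldl
    (fun best kw =>
      let p := pvPriority.getD kw 5
      if p < best then p else best) 5
  -- _AGENTS[best]; best is always in [0, 5], so the lookup never fails
  (PySem.List.pyGet? pvAgents best).getD ""

-- ===== PRECONDITION & SPEC =====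
def Spec_simulate_agent_routing_py (keywords : List String) (out : String) : Prop := out = simulate_agent_routing_py_alt keywords
instance (keywords : List String) (out : String) : Decidable (Spec_simulate_agent_routing_py keywords out) := by unfold Spec_simulate_agent_routing_py; infer_instance

-- ===== CLAIM (what is proved, stated in full; the proofs are below) =====
def Claim_equal_simulate_agent_routing_py : Prop := ∀ (keywords : List String), Dom_simulate_agent_routing_py keywords → Spec_simulate_agent_routing_py keywords (simulate_agent_routing_py keywords)

-- ===== LEMMAS AND PROOFS =====

-- the priority B assigns to a single keyword, and B's fold as a named function
def pvPrio (kw : String) : Int := pvPriority.getD kw 5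

def pvFold (l : List String) (b : Int) : Int :=
  l.foldl (fun best kw => let p := pvPriority.getD kw 5; if p < best then p else best) b

theorem pvFold_cons (k : String) (l : List String) (b : Int) :
    pvFold (k :: l) b = pvFold l (if pvPrio k < b then pvPrio k else b) := rfl

theorem pvPriority_mk : pvPriority = PySem.Dict.mk
    [("security", (0:Int)), ("jwt", 0), ("auth", 0),
     ("ui", 1), ("frontend", 1), ("component", 1),
     ("api", 2), ("backend", 2), ("integration", 2),
     ("performance", 3), ("monitoring", 3),
     ("architecture", 4), ("design", 4)] := by decide

-- full characterisation of the priority lookup: which keywords map to each priority, and its bounds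
theorem pvPrio_char (kw : String) :
    (pvPrio kw = 0 ↔ (kw = "security" ∨ kw = "jwt" ∨ kw = "auth")) ∧
    (pvPrio kw = 1 ↔ (kw = "ui" ∨ kw = "frontend" ∨ kw = "component")) ∧
    (pvPrio kw = 2 ↔ (kw = "api" ∨ kw = "backend" ∨ kw = "integration")) ∧
    (pvPrio kw = 3 ↔ (kw = "performance" ∨ kw = "monitoring")) ∧
    (pvPrio kw = 4 ↔ (kw = "architecture" ∨ kw = "design")) ∧
    (0 ≤ pvPrio kw ∧ pvPrio kw ≤ 5) := by
  rcases eq_or_ne kw "security" with rfl | h1; · decide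
  rcases eq_or_ne kw "jwt" with rfl | h2; · decide
  rcases eq_or_ne kw "auth" with rfl | h3; · decide
  rcases eq_or_ne kw "ui" with rfl | h4; · decide
  rcases eq_or_ne kw "frontend" with rfl | h5; · decide
  rcases eq_or_ne kw "component" with rfl | h6; · decide
  rcases eq_or_ne kw "api" with rfl | h7; · decide
  rcases eq_or_ne kw "backend" with rfl | h8; · decide
  rcases eq_or_ne kw "integration" with rfl | h9; · decide
  rcases eq_or_ne kw "performance" with rfl | h10; · decide
  rcases eq_or_ne kw "monitoring" with rfl | h11; · decide
  rcases eq_or_ne kw "architecture" with rfl | h12; · decide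
  rcases eq_or_ne kw "design" with rfl | h13; · decide
  have hv : pvPrio kw = 5 := by
    simp [pvPrio, pvPriority_mk, PySem.Dict.getD_eq_get?_getD, PySem.Dict.get?,
      Ne.symm h1, Ne.symm h2, Ne.symm h3, Ne.symm h4, Ne.symm h5, Ne.symm h6, Ne.symm h7,
      Ne.symm h8, Ne.symm h9, Ne.symm h10, Ne.symm h11, Ne.symm h12, Ne.symm h13]
  simp [hv, h1, h2, h3, h4, h5, h6, h7, h8, h9, h10, h11, h12, h13]

theorem pvPrio_bounds (kw : String) : 0 ≤ pvPrio kw ∧ pvPrio kw ≤ 5 :=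
  (pvPrio_char kw).2.2.2.2.2

theorem pvFold_le_init (l : List String) (b : Int) : pvFold l b ≤ b := by
  induction l generalizing b with
  | nil => simp [pvFold]
  | cons k t ih =>
    rw [pvFold_cons]
    split
    · exact le_trans (ih _) (by omega)
    · exact ih _

theorem pvFold_ge (l : List String) (b : Int) (hb : 0 ≤ b) : 0 ≤ pvFold l b := by
  induction l generalizing b with
  | nil => simpa [pvFold]
  | cons k t ih =>
    rw [pvFold_cons]
    have := pvPrio_bounds k
    split <;> (apply ih; omega)

theorem pvFold_le_mem (l : List String) (b : Int) (kw : String) (h : kw ∈ l) :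
    pvFold l b ≤ pvPrio kw := by
  induction l generalizing b with
  | nil => cases h
  | cons k t ih =>
    rw [pvFold_cons]
    rcases List.mem_cons.mp h with rfl | h
    · split
      · exact pvFold_le_init _ _
      · exact le_trans (pvFold_le_init _ _) (by omega)
    · exact ih _ h

theorem pvFold_attain (l : List String) (b : Int) :
    pvFold l b = b ∨ ∃ kw ∈ l, pvFold l b = pvPrio kw := by
  induction l generalizing b with
  | nil => left; rfl
  | cons k t ih =>
    rw [pvFold_cons]
    split
    · rcases ih (pvPrio k) with h | ⟨kw, hm, h⟩
      · exact Or.inr ⟨k, List.mem_cons_self, h⟩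
      · exact Or.inr ⟨kw, List.mem_cons_of_mem _ hm, h⟩
    · rcases ih b with h | ⟨kw, hm, h⟩
      · exact Or.inl h
      · exact Or.inr ⟨kw, List.mem_cons_of_mem _ hm, h⟩

-- A's any-tests over the fixed route lists, re-expressed as scans of the input keywords
theorem pvAny0 (keywords : List String) :
    ((["security", "jwt", "auth"] : List String).any (fun word => keywords.contains word) = true)
      ↔ ∃ kw ∈ keywords, pvPrio kw = 0 := by
  simp only [List.any_cons, List.any_nil, Bool.or_eq_true, List.contains_eq_mem, decide_eq_true_eq,
    Bool.false_eq_true, or_false]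
  constructor
  · rintro (h | h | h) <;> exact ⟨_, h, by rw [(pvPrio_char _).1]; tauto⟩
  · rintro ⟨kw, hm, h⟩
    rcases (pvPrio_char kw).1.mp h with rfl | rfl | rfl <;> tauto

theorem pvAny1 (keywords : List String) :
    ((["ui", "frontend", "component"] : List String).any (fun word => keywords.contains word) = true)
      ↔ ∃ kw ∈ keywords, pvPrio kw = 1 := by
  simp only [List.any_cons, List.any_nil, Bool.or_eq_true, List.contains_eq_mem, decide_eq_true_eq,
    Bool.false_eq_true, or_false]
  constructor
  · rintro (h | h | h) <;> exact ⟨_, h, by rw [(pvPrio_char _).2.1]; tauto⟩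
  · rintro ⟨kw, hm, h⟩
    rcases (pvPrio_char kw).2.1.mp h with rfl | rfl | rfl <;> tauto

theorem pvAny2 (keywords : List String) :
    ((["api", "backend", "integration"] : List String).any (fun word => keywords.contains word) = true)
      ↔ ∃ kw ∈ keywords, pvPrio kw = 2 := by
  simp only [List.any_cons, List.any_nil, Bool.or_eq_true, List.contains_eq_mem, decide_eq_true_eq,
    Bool.false_eq_true, or_false]
  constructor
  · rintro (h | h | h) <;> exact ⟨_, h, by rw [(pvPrio_char _).2.2.1]; tauto⟩
  · rintro ⟨kw, hm, h⟩
    rcases (pvPrio_char kw).2.2.1.mp h with rfl | rfl | rfl <;> tauto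

theorem pvAny3 (keywords : List String) :
    ((["performance", "monitoring"] : List String).any (fun word => keywords.contains word) = true)
      ↔ ∃ kw ∈ keywords, pvPrio kw = 3 := by
  simp only [List.any_cons, List.any_nil, Bool.or_eq_true, List.contains_eq_mem, decide_eq_true_eq,
    Bool.false_eq_true, or_false]
  constructor
  · rintro (h | h) <;> exact ⟨_, h, by rw [(pvPrio_char _).2.2.2.1]; tauto⟩
  · rintro ⟨kw, hm, h⟩
    rcases (pvPrio_char kw).2.2.2.1.mp h with rfl | rfl <;> tauto

theorem pvAny4 (keywords : List String) :
    ((["architecture", "design"] : List String).any (fun word => keywords.contains word) = true)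
      ↔ ∃ kw ∈ keywords, pvPrio kw = 4 := by
  simp only [List.any_cons, List.any_nil, Bool.or_eq_true, List.contains_eq_mem, decide_eq_true_eq,
    Bool.false_eq_true, or_false]
  constructor
  · rintro (h | h) <;> exact ⟨_, h, by rw [(pvPrio_char _).2.2.2.2.1]; tauto⟩
  · rintro ⟨kw, hm, h⟩
    rcases (pvPrio_char kw).2.2.2.2.1.mp h with rfl | rfl <;> tauto

theorem pvAlt_eq (keywords : List String) :
    simulate_agent_routing_py_alt keywords
      = (PySem.List.pyGet? pvAgents (pvFold keywords 5)).getD "" := rfl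

-- ===== VERDICT (by name: the statement is the Claim_ definition above) =====
theorem simulate_agent_routing_py_spec : Claim_equal_simulate_agent_routing_py := by
  intro keywords _
  unfold Spec_simulate_agent_routing_py
  rw [pvAlt_eq]
  set m := pvFold keywords 5 with hm
  have hub : m ≤ 5 := pvFold_le_init _ _
  have hlb : 0 ≤ m := pvFold_ge _ _ (by omega)
  have hmem : ∀ kw ∈ keywords, m ≤ pvPrio kw := fun kw h => pvFold_le_mem _ _ _ h
  have hatt : m = 5 ∨ ∃ kw ∈ keywords, m = pvPrio kw := pvFold_attain _ _
  have hno : ∀ i : Int, i < m → ¬ ∃ kw ∈ keywords, pvPrio kw = i := by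
    rintro i hi ⟨kw, hk, hp⟩
    have := hmem kw hk
    omega
  unfold simulate_agent_routing_py
  interval_cases m
  · -- m = 0
    have h0 : ∃ kw ∈ keywords, pvPrio kw = 0 := by
      rcases hatt with h | ⟨kw, hk, hp⟩
      · omega
      · exact ⟨kw, hk, hp.symm⟩
    rw [if_pos ((pvAny0 keywords).mpr h0)]
    decide
  · -- m = 1
    have h1 : ∃ kw ∈ keywords, pvPrio kw = 1 := by
      rcases hatt with h | ⟨kw, hk, hp⟩
      · omega
      · exact ⟨kw, hk, hp.symm⟩
    rw [if_neg (fun h => hno 0 (by omega) ((pvAny0 keywords).mp h)),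
        if_pos ((pvAny1 keywords).mpr h1)]
    decide
  · -- m = 2
    have h2 : ∃ kw ∈ keywords, pvPrio kw = 2 := by
      rcases hatt with h | ⟨kw, hk, hp⟩
      · omega
      · exact ⟨kw, hk, hp.symm⟩
    rw [if_neg (fun h => hno 0 (by omega) ((pvAny0 keywords).mp h)),
        if_neg (fun h => hno 1 (by omega) ((pvAny1 keywords).mp h)),
        if_pos ((pvAny2 keywords).mpr h2)]
    decide
  · -- m = 3
    have h3 : ∃ kw ∈ keywords, pvPrio kw = 3 := by
      rcases hatt with h | ⟨kw, hk, hp⟩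
      · omega
      · exact ⟨kw, hk, hp.symm⟩
    rw [if_neg (fun h => hno 0 (by omega) ((pvAny0 keywords).mp h)),
        if_neg (fun h => hno 1 (by omega) ((pvAny1 keywords).mp h)),
        if_neg (fun h => hno 2 (by omega) ((pvAny2 keywords).mp h)),
        if_pos ((pvAny3 keywords).mpr h3)]
    decide
  · -- m = 4
    have h4 : ∃ kw ∈ keywords, pvPrio kw = 4 := by
      rcases hatt with h | ⟨kw, hk, hp⟩
      · omega
      · exact ⟨kw, hk, hp.symm⟩
    rw [if_neg (fun h => hno 0 (by omega) ((pvAny0 keywords).mp h)),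
        if_neg (fun h => hno 1 (by omega) ((pvAny1 keywords).mp h)),
        if_neg (fun h => hno 2 (by omega) ((pvAny2 keywords).mp h)),
        if_neg (fun h => hno 3 (by omega) ((pvAny3 keywords).mp h)),
        if_pos ((pvAny4 keywords).mpr h4)]
    decide
  · -- m = 5
    rw [if_neg (fun h => hno 0 (by omega) ((pvAny0 keywords).mp h)),
        if_neg (fun h => hno 1 (by omega) ((pvAny1 keywords).mp h)),
        if_neg (fun h => hno 2 (by omega) ((pvAny2 keywords).mp h)),
        if_neg (fun h => hno 3 (by omega) ((pvAny3 keywords).mp h)),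
        if_neg (fun h => hno 4 (by omega) ((pvAny4 keywords).mp h))]
    decide
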